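-- pv_equiv track=rewrite | github.com/lucastsui/collatz-research | parity_feedback.py | carry_weight
-- ===== SOURCE A (Python) =====
-- def carry_weight(terms):
--     """Total carry generated when adding terms in binary."""
--     if not terms:
--         return 0, []
--     max_bits = max(t.bit_length() for t in terms if t > 0) + len(terms) + 2
--     total_carry = 0
--     carry = 0
--     carries = []
--     for bit in range(max_bits):
--         col_sum = carry
--         for t in terms:
--             col_sum += (t >> bit) & 1
--         carry = col_sum >> 1
--         carries.append(carry)
--         total_carry += carry
--     return total_carry, carries
-- ===== SOURCE B (Python) =====
-- def carry_weight(terms):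
--     """Total carry generated when adding terms in binary."""
--     if not terms:
--         return 0, []
--     max_bits = max(t.bit_length() for t in terms if t > 0) + len(terms) + 2
--     neg = sum(1 for t in terms if t < 0)
--     mask = (1 << max_bits) - 1
--     # column b holds sum of bit b over all terms: a negative t has bit b equal
--     # to 1 - (bit b of ~t), so start every column at `neg` and subtract ~t's bits
--     counts = [neg] * max_bits
--     for t in terms:
--         delta = 1 if t >= 0 else -1
--         m = (t if t >= 0 else ~t) & mask
--         bit = 0
--         while m:
--             if m & 1:
--                 counts[bit] += delta
--             m >>= 1
--             bit += 1
--     total_carry = 0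
--     carry = 0
--     carries = []
--     for col in counts:
--         carry = (carry + col) >> 1
--         carries.append(carry)
--         total_carry += carry
--     return total_carry, carries
-- ===== Notes on version B (the rewrite author's own statement) =====
-- stated objective: faster
-- what changed: Instead of scanning every term (and re-shifting it) for each of the max_bits columns, B makes one pass over each term's own set bits (negatives via the two's-complement trick: a negative contributes 1 per column minus the bits of ~t) to build per-column counts, then a single carry-propagation pass over the counts.
import Mathlib
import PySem

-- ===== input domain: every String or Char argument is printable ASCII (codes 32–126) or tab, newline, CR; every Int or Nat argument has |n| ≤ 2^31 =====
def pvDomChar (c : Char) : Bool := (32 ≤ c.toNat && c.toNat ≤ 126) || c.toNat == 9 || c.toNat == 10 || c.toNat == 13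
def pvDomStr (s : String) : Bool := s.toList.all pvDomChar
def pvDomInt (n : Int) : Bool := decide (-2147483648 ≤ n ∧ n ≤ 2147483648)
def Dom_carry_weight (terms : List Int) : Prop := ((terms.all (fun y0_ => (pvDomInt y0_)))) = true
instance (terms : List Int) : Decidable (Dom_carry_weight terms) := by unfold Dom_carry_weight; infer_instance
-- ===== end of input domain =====

-- B replaces A's column-by-column rescan of all terms with one pass over each
-- term's own bits (negatives via the complement trick) plus a single
-- carry-propagation pass over the per-column counts.

-- ===== PORT A =====
-- max(t.bit_length() for t in terms if t > 0): raises ValueError on an empty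
-- generator, excluded by Pre_; the .getD 0 is never reached inside Pre_.
def carry_weight (terms : List Int) : Int × List Int :=
  if terms = [] then (0, [])
  else
    let max_bits : Int :=
      ((PySem.List.max? ((terms.filter (fun t => 0 < t)).map
          (fun t => (PySem.Int.bitLength t : Int))) (fun x => x)).getD 0)
        + terms.length + 2
    -- for bit in range(max_bits): bit ≥ 0, so `t >> bit` is `t >>> bit.toNat`
    let r := (PySem.List.pyRange 0 max_bits 1).foldl
      (fun (acc : Int × Int × List Int) bit =>
        let col_sum := terms.foldl
          (fun s t => s + PySem.Int.band (t >>> bit.toNat) 1) acc.2.1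
        let carry := col_sum >>> (1 : Nat)
        (acc.1 + carry, carry, acc.2.2 ++ [carry]))
      (0, 0, [])
    (r.1, r.2.2)

-- ===== PORT B =====
-- the inner `while m:` loop of Source B; m = (t if t >= 0 else ~t) % (1 << max_bits)
-- is nonnegative in Python, so it is carried as a Nat (>> and & 1 are / and % 2)
def addBits (counts : List Int) (delta : Int) (m : Nat) (bit : Nat) : List Int :=
  if m = 0 then counts
  else addBits (if m % 2 = 1 then counts.modify bit (fun x => x + delta) else counts)
    delta (m / 2) (bit + 1)
termination_by m
decreasing_by omega

def carry_weight_alt (terms : List Int) : Int × List Int :=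
  if terms = [] then (0, [])
  else
    let max_bits : Int :=
      ((PySem.List.max? ((terms.filter (fun t => 0 < t)).map
          (fun t => (PySem.Int.bitLength t : Int))) (fun x => x)).getD 0)
        + terms.length + 2
    let neg : Int := terms.foldl (fun s t => if t < 0 then s + 1 else s) 0
    let limit : Int := (1 : Int) <<< max_bits.toNat
    let counts := terms.foldl
      (fun c t =>
        addBits c (if 0 ≤ t then 1 else -1)
          (PySem.Int.mod (if 0 ≤ t then t else Int.not t) limit).toNat 0)
      (List.replicate max_bits.toNat neg)
    let r := counts.foldl
      (fun (acc : Int × Int × List Int) col =>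
        let carry := (acc.2.1 + col) >>> (1 : Nat)
        (acc.1 + carry, carry, acc.2.2 ++ [carry]))
      (0, 0, [])
    (r.1, r.2.2)

-- ===== PRECONDITION & SPEC =====
-- Pre_ excludes only inputs where A raises: a nonempty list with no positive
-- element makes max() raise ValueError on an empty generator.
def Pre_carry_weight (terms : List Int) : Prop := terms = [] ∨ ∃ t ∈ terms, 0 < t
instance (terms : List Int) : Decidable (Pre_carry_weight terms) := by
  unfold Pre_carry_weight; infer_instance
def pvWitness_carry_weight : List Int := [3, -2]

def Spec_carry_weight (terms : List Int) (out : Int × List Int) : Prop := out = carry_weight_alt terms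
instance (terms : List Int) (out : Int × List Int) : Decidable (Spec_carry_weight terms out) := by unfold Spec_carry_weight; infer_instance

-- ===== CLAIM (what is proved, stated in full; the proofs are below) =====
def Claim_equal_carry_weight : Prop := ∀ (terms : List Int), Dom_carry_weight terms → Pre_carry_weight terms → Spec_carry_weight terms (carry_weight terms)

-- ===== LEMMAS AND PROOFS =====

-- Python's (t >> j) & 1, as an ediv/emod expression
theorem pybit_eq (t : Int) (j : Nat) :
    PySem.Int.band (t >>> j) 1 = (t / 2 ^ j) % 2 := by
  rw [PySem.Int.band_one, PySem.Int.mod_eq_emod_of_pos (by omega),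
    Int.shiftRight_eq_div_pow]
  push_cast
  rfl

-- low bits are unchanged by reduction mod 2^B
theorem bit_emod_pow (t : Int) (j B : Nat) (h : j < B) :
    ((t % 2 ^ B) / 2 ^ j) % 2 = (t / 2 ^ j) % 2 := by
  have hsplit : (2 ^ (B - j) : Int) * 2 ^ j = 2 ^ B := by
    rw [← pow_add]; congr 1; omega
  have ht : t = t % 2 ^ B + (2 ^ (B - j) * (t / 2 ^ B)) * 2 ^ j := by
    have hd := Int.emod_add_ediv t (2 ^ B)
    linear_combination -hd - (t / 2 ^ B) * hsplit
  have h2 : (2 ^ (B - j) : Int) * (t / 2 ^ B)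
      = 2 * (2 ^ (B - j - 1) * (t / 2 ^ B)) := by
    rw [← mul_assoc, ← pow_succ']; congr 2; omega
  calc (t % 2 ^ B / 2 ^ j) % 2
      = (t % 2 ^ B / 2 ^ j + 2 ^ (B - j) * (t / 2 ^ B)) % 2 := by omega
    _ = (t / 2 ^ j) % 2 := by
        conv_rhs => rw [ht]
        rw [Int.add_mul_ediv_right _ _ (by positivity : (2:Int) ^ j ≠ 0)]

-- the bit of ~t is the complement of the bit of t
theorem bit_not (t : Int) (j : Nat) :
    ((-t - 1) / 2 ^ j) % 2 = 1 - (t / 2 ^ j) % 2 := by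
  have hp : (0:Int) < 2 ^ j := by positivity
  have h1 : (-t - 1) / 2 ^ j = -(t / 2 ^ j) - 1 := by
    have hm := Int.emod_add_ediv t (2 ^ j)
    have hb := Int.emod_nonneg t (by omega : (2:Int) ^ j ≠ 0)
    have hb2 := Int.emod_lt_of_pos t hp
    have hrw : -t - 1 = (2 ^ j - 1 - t % 2 ^ j) + (-(t / 2 ^ j) - 1) * 2 ^ j := by
      linear_combination hm
    rw [hrw, Int.add_mul_ediv_right _ _ (by omega : (2:Int) ^ j ≠ 0),
      Int.ediv_eq_zero_of_lt (by omega) (by omega)]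
    omega
  rw [h1]; omega

theorem int_not_eq (t : Int) : Int.not t = -t - 1 := by
  cases t <;> simp [Int.not, Int.negSucc_eq] <;> ring

theorem addBits_length (counts : List Int) (delta : Int) (m bit : Nat) :
    (addBits counts delta m bit).length = counts.length := by
  fun_induction addBits with
  | case1 => rfl
  | case2 c m b hm ih =>
    simp only [dite_eq_ite] at ih
    rw [ih]; split <;> simp

theorem addBits_getD (counts : List Int) (delta : Int) (m bit j : Nat)
    (hj : j < counts.length) :
    (addBits counts delta m bit).getD j 0
      = counts.getD j 0 + (if bit ≤ j then ((m / 2 ^ (j - bit)) % 2 : Nat) * delta else 0) := by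
  fun_induction addBits with
  | case1 c b =>
    simp
  | case2 c m b hm ih =>
    simp only [dite_eq_ite] at ih
    have hlen : (if m % 2 = 1 then c.modify b (fun x => x + delta) else c).length = c.length := by
      split <;> simp
    have hgd : ∀ (l : List Int) (hl : j < l.length), l.getD j 0 = l[j] := by
      intro l hl; simp [List.getD_eq_getElem?_getD, List.getElem?_eq_getElem hl]
    have hsame : (if m % 2 = 1 then c.modify b (fun x => x + delta) else c).getD j 0
        = c.getD j 0 + (if b = j then ((m % 2 : Nat) : Int) * delta else 0) := by
      split
      · next h1 =>
        have hjm : j < (c.modify b (fun x => x + delta)).length := by simpa using hj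
        rw [hgd _ hjm, hgd c hj, List.getElem_modify]
        by_cases heq : b = j
        · simp [heq, h1]
        · simp [heq]
      · next h1 =>
        have hm0 : m % 2 = 0 := by omega
        simp [hm0]
    rw [ih (by omega), hsame]
    by_cases heq : b = j
    · subst heq
      simp [show ¬ (b + 1 ≤ b) by omega]
    · by_cases hbj : b ≤ j
      · have hb1 : b + 1 ≤ j := by omega
        have hsub : j - b = (j - (b + 1)) + 1 := by omega
        rw [if_neg heq, if_pos hb1, if_pos hbj, hsub, pow_succ', ← Nat.div_div_eq_div_mul]
        ring
      · have hne : ¬ (b + 1 ≤ j) := by omega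
        rw [if_neg heq, if_neg hne, if_neg hbj]
        ring

-- the per-term folding step of B, characterized column by column
theorem foldl_addBits_getD (terms : List Int) (f : Int → Nat) (δ : Int → Int) :
    ∀ (c : List Int) (j : Nat), j < c.length →
      (terms.foldl (fun c t => addBits c (δ t) (f t) 0) c).getD j 0
        = c.getD j 0 + (terms.map (fun t => ((f t / 2 ^ j) % 2 : Nat) * δ t)).sum := by
  induction terms with
  | nil => intro c j hj; simp
  | cons hd tl ih =>
    intro c j hj
    simp only [List.foldl_cons, List.map_cons, List.sum_cons]
    rw [ih _ j (by rw [addBits_length]; omega), addBits_getD c (δ hd) (f hd) 0 j hj]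
    simp
    ring

theorem foldl_addBits_length (terms : List Int) (f : Int → Nat) (δ : Int → Int)
    (c : List Int) :
    (terms.foldl (fun c t => addBits c (δ t) (f t) 0) c).length = c.length := by
  induction terms generalizing c with
  | nil => rfl
  | cons hd tl ih => rw [List.foldl_cons, ih, addBits_length]

-- per-term, per-column bridge: B's contribution equals Python's (t >> j) & 1
theorem term_bit_bridge (t : Int) (j B : Nat) (hj : j < B) :
    (if t < 0 then (1:Int) else 0)
      + (((PySem.Int.mod (if 0 ≤ t then t else Int.not t) ((1:Int) <<< B)).toNat / 2 ^ j) % 2 : Nat)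
        * (if 0 ≤ t then 1 else -1)
      = PySem.Int.band (t >>> j) 1 := by
  have hlim : ((1:Int) <<< B) = 2 ^ B := by
    simp [Int.shiftLeft_eq]
  have hpos : (0:Int) < 2 ^ B := by positivity
  rw [pybit_eq, hlim]
  by_cases h0 : 0 ≤ t
  · simp only [if_pos h0, if_neg (show ¬ t < 0 by omega)]
    rw [PySem.Int.mod_eq_emod_of_pos hpos]
    have hnn : 0 ≤ t % 2 ^ B := Int.emod_nonneg t (by omega)
    have hcast : (((t % 2 ^ B).toNat / 2 ^ j) % 2 : Nat) = (((t % 2 ^ B) / 2 ^ j) % 2 : Int) := by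
      push_cast [Int.toNat_of_nonneg hnn]
      rfl
    rw [mul_one, zero_add, hcast, bit_emod_pow t j B hj]
  · simp only [if_neg h0, if_pos (show t < 0 by omega)]
    rw [PySem.Int.mod_eq_emod_of_pos hpos, int_not_eq]
    have hnn : 0 ≤ (-t - 1) % 2 ^ B := Int.emod_nonneg _ (by omega)
    have hcast : ((((-t - 1) % 2 ^ B).toNat / 2 ^ j) % 2 : Nat)
        = ((((-t - 1) % 2 ^ B) / 2 ^ j) % 2 : Int) := by
      push_cast [Int.toNat_of_nonneg hnn]
      rfl
    rw [hcast, bit_emod_pow (-t - 1) j B hj, bit_not t j]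
    ring

-- the count of negative terms, as a sum of indicators
theorem neg_count_eq (terms : List Int) :
    terms.foldl (fun s t => if t < 0 then s + 1 else s) (0:Int)
      = (terms.map (fun t => if t < 0 then (1:Int) else 0)).sum := by
  have hbody : (fun (s : Int) (t : Int) => if t < 0 then s + 1 else s)
      = fun s t => s + (if t < 0 then 1 else 0) := by
    funext s t; split <;> omega
  rw [hbody, PySem.List.foldl_add]
  simp

-- A's column loop over range(max_bits) equals B's fold over the counts list,
-- provided the counts list holds the per-column bit sums
theorem carry_fold_eq (terms : List Int) (c : List Int) :
    ∀ (a : Int) (acc : Int × Int × List Int), 0 ≤ a →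
      (∀ j (hj : j < c.length),
        c.getD j 0 = (terms.map (fun (t : Int) => PySem.Int.band (t >>> (a.toNat + j)) 1)).sum) →
      (PySem.List.pyRange a (a + c.length) 1).foldl
        (fun (acc : Int × Int × List Int) bit =>
          let col_sum := terms.foldl
            (fun s t => s + PySem.Int.band (t >>> bit.toNat) 1) acc.2.1
          let carry := col_sum >>> (1 : Nat)
          (acc.1 + carry, carry, acc.2.2 ++ [carry])) acc
      = c.foldl
        (fun (acc : Int × Int × List Int) col =>
          let carry := (acc.2.1 + col) >>> (1 : Nat)
          (acc.1 + carry, carry, acc.2.2 ++ [carry])) acc := by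
  induction c with
  | nil =>
    intro a acc _ _
    simp
  | cons hd tl ih =>
    intro a acc ha hc
    have hcons : PySem.List.pyRange a (a + ((hd :: tl).length : Int)) 1
        = a :: PySem.List.pyRange (a + 1) (a + ((hd :: tl).length : Int)) 1 := by
      refine PySem.List.pyRange_one_cons ?_
      push_cast [List.length_cons]
      omega
    rw [hcons]
    simp only [List.foldl_cons]
    have hhd : hd = (terms.map (fun (t : Int) => PySem.Int.band (t >>> a.toNat) 1)).sum := by
      have h0 := hc 0 (by simp)
      simpa using h0
    rw [PySem.List.foldl_add terms (fun (t : Int) => PySem.Int.band (t >>> a.toNat) 1) acc.2.1, ← hhd]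
    have hbnd : a + ((hd :: tl).length : Int) = (a + 1) + (tl.length : Int) := by
      simp
      omega
    rw [hbnd, ih (a + 1) _ (by omega)]
    intro j hj
    have hj1 := hc (j + 1) (by simp; omega)
    rw [List.getD_cons_succ] at hj1
    rw [hj1]
    refine congrArg List.sum (List.map_congr_left ?_)
    intro t _
    have hidx : a.toNat + (j + 1) = (a + 1).toNat + j := by omega
    rw [hidx]

-- max_bits is always nonnegative (for nonempty terms)
theorem max_bits_nonneg (terms : List Int) :
    0 ≤ ((PySem.List.max? ((terms.filter (fun t => 0 < t)).map
        (fun t => (PySem.Int.bitLength t : Int))) (fun x => x)).getD 0)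
      + terms.length + 2 := by
  have h1 : 0 ≤ ((PySem.List.max? ((terms.filter (fun t => 0 < t)).map
      (fun t => (PySem.Int.bitLength t : Int))) (fun x => x)).getD 0) := by
    cases hm : PySem.List.max? ((terms.filter (fun t => 0 < t)).map
        (fun t => (PySem.Int.bitLength t : Int))) (fun x => x) with
    | none => simp
    | some v =>
      have hv := PySem.List.max?_mem hm
      simp only [List.mem_map] at hv
      obtain ⟨t, _, rfl⟩ := hv
      simp
  have h2 : (0:Int) ≤ terms.length := by positivity
  omega

-- ===== VERDICT (by name: the statement is the Claim_ definition above) =====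
theorem carry_weight_spec : Claim_equal_carry_weight := by
  intro terms _ _
  unfold Spec_carry_weight carry_weight carry_weight_alt
  by_cases hnil : terms = []
  · simp [hnil]
  · rw [if_neg hnil, if_neg hnil]
    simp only []
    set MB : Int := ((PySem.List.max? ((terms.filter (fun t => 0 < t)).map
        (fun t => (PySem.Int.bitLength t : Int))) (fun x => x)).getD 0)
      + terms.length + 2 with hMB
    have hMBnn : 0 ≤ MB := max_bits_nonneg terms
    set neg : Int := terms.foldl (fun s t => if t < 0 then s + 1 else s) 0 with hneg
    set counts := terms.foldl
      (fun c t =>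
        addBits c (if 0 ≤ t then 1 else -1)
          (PySem.Int.mod (if 0 ≤ t then t else Int.not t) ((1:Int) <<< MB.toNat)).toNat 0)
      (List.replicate MB.toNat neg) with hcounts
    have hclen : counts.length = MB.toNat := by
      rw [hcounts, foldl_addBits_length]
      simp
    have hcget : ∀ j (hj : j < counts.length),
        counts.getD j 0 = (terms.map (fun (t : Int) => PySem.Int.band (t >>> ((0:Int).toNat + j)) 1)).sum := by
      intro j hj
      have hjB : j < MB.toNat := by omega
      rw [hcounts, foldl_addBits_getD terms
        (fun t => (PySem.Int.mod (if 0 ≤ t then t else Int.not t) ((1:Int) <<< MB.toNat)).toNat)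
        (fun t => if 0 ≤ t then 1 else -1) _ j (by simpa using hjB)]
      rw [List.getD_replicate neg hjB]
      rw [hneg, neg_count_eq, ← List.sum_map_add]
      refine congrArg List.sum (List.map_congr_left ?_)
      intro t _
      have hb := term_bit_bridge t j MB.toNat hjB
      simpa using hb
    have hrange : MB = 0 + (counts.length : Int) := by
      rw [hclen]
      omega
    rw [hrange, carry_fold_eq terms counts 0 (0,0,[]) (by omega) hcget]
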